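-- pv_equiv track=rewrite | github.com/rlnguyen/devin-issues-cli-integration | cli/main.py | get_label_color
-- ===== SOURCE A (Python) =====
-- def get_label_color(label_name: str) -> str:
--     """
--     Return a color for a label based on its type.
--
--     Red: Bugs and Errors
--     Blue: Features and improvements
--     Cyan: Documentation
--     Green: Simple (Junior-dev) issues
--     Bold-red: Critical Issues
--     Yellow: Unassigned
--     """
--     label_lower = label_name.lower()
--
--     # Bugs and errors
--     if any(word in label_lower for word in ["bug", "error", "crash", "fail"]):
--         return "red"
--     # Features and enhancements
--     elif any(word in label_lower for word in ["feature", "enhancement", "improve"]):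
--         return "blue"
--     # Documentation
--     elif any(word in label_lower for word in ["doc", "documentation"]):
--         return "cyan"
--     # Good first issues
--     elif any(word in label_lower for word in ["good first", "beginner", "easy"]):
--         return "green"
--     # High priority
--     elif any(word in label_lower for word in ["critical", "urgent", "high"]):
--         return "bold red"
--     else:
--         return "yellow"
-- ===== SOURCE B (Python) =====
-- _KEYWORD_PRIORITY = {
--     "bug": 0, "error": 0, "crash": 0, "fail": 0,
--     "feature": 1, "enhancement": 1, "improve": 1,
--     "doc": 2, "documentation": 2,
--     "good first": 3, "beginner": 3, "easy": 3,
--     "critical": 4, "urgent": 4, "high": 4,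
-- }
-- _COLORS = ["red", "blue", "cyan", "green", "bold red", "yellow"]
--
--
-- def get_label_color(label_name: str) -> str:
--     """Flat keyword->priority map; return the color of the minimum priority
--     among all matching keywords (5 = no match = yellow). No ordered rule
--     chain or early return; correct because the first matching category in
--     A's chain is exactly the matching keyword of minimum priority."""
--     label_lower = label_name.lower()
--     best = 5
--     for kw, pri in _KEYWORD_PRIORITY.items():
--         if pri < best and kw in label_lower:
--             best = pri
--     return _COLORS[best]
-- ===== Notes on version B (the rewrite author's own statement) =====
-- stated objective: alternative
-- what changed: B flattens the categories into one keyword->priority map, computes the minimum priority over all matching keywords in a single pass with no early return, and indexes a color table by that minimum; A's if/elif chain of per-category any() checks disappears.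
import Mathlib
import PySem

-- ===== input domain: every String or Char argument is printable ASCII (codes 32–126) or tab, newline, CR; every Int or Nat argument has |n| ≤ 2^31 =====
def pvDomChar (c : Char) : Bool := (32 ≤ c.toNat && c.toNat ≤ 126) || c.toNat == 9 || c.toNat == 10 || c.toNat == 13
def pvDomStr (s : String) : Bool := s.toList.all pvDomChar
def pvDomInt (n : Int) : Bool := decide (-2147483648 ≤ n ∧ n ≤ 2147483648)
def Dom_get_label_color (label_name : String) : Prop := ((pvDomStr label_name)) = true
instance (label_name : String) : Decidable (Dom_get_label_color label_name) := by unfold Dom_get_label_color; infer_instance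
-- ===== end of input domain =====

-- B replaces A's if/elif chain of per-category checks by a flat keyword→priority map,
-- a one-pass minimum over all matching keywords, and a color table lookup (alternative; same cost).

-- ===== PORT A =====
def get_label_color (label_name : String) : String :=
  let label_lower := PySem.Str.lower label_name
  if ["bug", "error", "crash", "fail"].any (fun word => PySem.Str.isIn word label_lower) then
    "red"
  else if ["feature", "enhancement", "improve"].any (fun word => PySem.Str.isIn word label_lower) then
    "blue"
  else if ["doc", "documentation"].any (fun word => PySem.Str.isIn word label_lower) then
    "cyan"
  else if ["good first", "beginner", "easy"].any (fun word => PySem.Str.isIn word label_lower) then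
    "green"
  else if ["critical", "urgent", "high"].any (fun word => PySem.Str.isIn word label_lower) then
    "bold red"
  else
    "yellow"

-- ===== PORT B =====
-- the module-level dict _KEYWORD_PRIORITY, iterated in insertion order
def pvKeywordPriority : List (String × Int) :=
  [ ("bug", 0)
  , ("error", 0)
  , ("crash", 0)
  , ("fail", 0)
  , ("feature", 1)
  , ("enhancement", 1)
  , ("improve", 1)
  , ("doc", 2)
  , ("documentation", 2)
  , ("good first", 3)
  , ("beginner", 3)
  , ("easy", 3)
  , ("critical", 4)
  , ("urgent", 4)
  , ("high", 4) ]

def pvColors : List String := ["red", "blue", "cyan", "green", "bold red", "yellow"]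

def get_label_color_alt (label_name : String) : String :=
  let label_lower := PySem.Str.lower label_name
  let best : Int :=
    pvKeywordPriority.foldl
      (fun best kp =>
        if kp.2 < best && PySem.Str.isIn kp.1 label_lower then kp.2 else best)
      5
  (PySem.List.pyGet? pvColors best).getD ""   -- best is always 0..5, so the index never raises

-- ===== PRECONDITION & SPEC =====
def Spec_get_label_color (label_name : String) (out : String) : Prop := out = get_label_color_alt label_name
instance (label_name : String) (out : String) : Decidable (Spec_get_label_color label_name out) := by unfold Spec_get_label_color; infer_instance

-- ===== CLAIM (what is proved, stated in full; the proofs are below) =====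
def Claim_equal_get_label_color : Prop := ∀ (label_name : String), Dom_get_label_color label_name → Spec_get_label_color label_name (get_label_color label_name)

-- ===== LEMMAS AND PROOFS =====

-- ===== VERDICT (by name: the statement is the Claim_ definition above) =====
-- proof-only helper: precompute each keyword's membership bit, turning the scan
-- into a fold over (matched?, priority) pairs
theorem scan_map_eq (l : String) (kps : List (String × Int)) (best : Int) :
    kps.foldl (fun best kp => if kp.2 < best && PySem.Str.isIn kp.1 l then kp.2 else best) best
      = (kps.map (fun kp => (PySem.Str.isIn kp.1 l, kp.2))).foldl
          (fun best bp => if bp.2 < best && bp.1 then bp.2 else best) best := by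
  induction kps generalizing best with
  | nil => rfl
  | cons kp rest ih => simp only [List.foldl_cons, List.map_cons, ih]

-- ===== VERDICT (by name: the statement is the Claim_ definition above) =====
theorem get_label_color_spec : Claim_equal_get_label_color := by
  intro label_name _
  delta Spec_get_label_color get_label_color get_label_color_alt pvKeywordPriority pvColors
  simp only [List.any_cons, List.any_nil, Bool.or_false, scan_map_eq, List.map_cons, List.map_nil]
  generalize PySem.Str.isIn "bug" (PySem.Str.lower label_name) = b0
  generalize PySem.Str.isIn "error" (PySem.Str.lower label_name) = b1
  generalize PySem.Str.isIn "crash" (PySem.Str.lower label_name) = b2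
  generalize PySem.Str.isIn "fail" (PySem.Str.lower label_name) = b3
  generalize PySem.Str.isIn "feature" (PySem.Str.lower label_name) = b4
  generalize PySem.Str.isIn "enhancement" (PySem.Str.lower label_name) = b5
  generalize PySem.Str.isIn "improve" (PySem.Str.lower label_name) = b6
  generalize PySem.Str.isIn "doc" (PySem.Str.lower label_name) = b7
  generalize PySem.Str.isIn "documentation" (PySem.Str.lower label_name) = b8
  generalize PySem.Str.isIn "good first" (PySem.Str.lower label_name) = b9
  generalize PySem.Str.isIn "beginner" (PySem.Str.lower label_name) = b10
  generalize PySem.Str.isIn "easy" (PySem.Str.lower label_name) = b11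
  generalize PySem.Str.isIn "critical" (PySem.Str.lower label_name) = b12
  generalize PySem.Str.isIn "urgent" (PySem.Str.lower label_name) = b13
  generalize PySem.Str.isIn "high" (PySem.Str.lower label_name) = b14
  cases b0 with
  | true => simp
  | false =>
    cases b1 with
    | true => simp
    | false =>
      cases b2 with
      | true => simp
      | false =>
        cases b3 with
        | true => simp
        | false =>
          cases b4 with
          | true => simp
          | false =>
            cases b5 with
            | true => simp
            | false =>
              cases b6 with
              | true => simp
              | false =>
                cases b7 with
                | true => simp
                | false =>
                  cases b8 with
                  | true => simp
                  | false =>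
                    cases b9 with
                    | true => simp
                    | false =>
                      cases b10 with
                      | true => simp
                      | false =>
                        cases b11 with
                        | true => simp
                        | false =>
                          cases b12 with
                          | true => simp
                          | false =>
                            cases b13 with
                            | true => simp
                            | false =>
                              cases b14 with
                              | true => simp
                              | false =>
                                simp
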